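-- pv_equiv track=rewrite | github.com/Espoir2/MetaApp | main.py | trouver_premiere_derniere
-- ===== SOURCE A (Python) =====
-- def trouver_premiere_derniere(letters, cible):
--     premiere = derniere = None
--     for letter in letters:
--         if letter in cible:
--             if premiere is None:
--                 premiere = letter
--             derniere = letter
--     return premiere, derniere
-- ===== SOURCE B (Python) =====
-- def trouver_premiere_derniere(letters, cible):
--     premiere = next((l for l in letters if l in cible), None)
--     derniere = next((l for l in reversed(letters) if l in cible), None)
--     return premiere, derniere
-- ===== Notes on version B (the rewrite author's own statement) =====
-- stated objective: faster
-- what changed: Replaces the single stateful full pass (running first/last variables with a None guard) by two independent early-terminating searches: a forward scan stopping at the first match and a backward scan over the reversed sequence stopping at the last match.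
import Mathlib
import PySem

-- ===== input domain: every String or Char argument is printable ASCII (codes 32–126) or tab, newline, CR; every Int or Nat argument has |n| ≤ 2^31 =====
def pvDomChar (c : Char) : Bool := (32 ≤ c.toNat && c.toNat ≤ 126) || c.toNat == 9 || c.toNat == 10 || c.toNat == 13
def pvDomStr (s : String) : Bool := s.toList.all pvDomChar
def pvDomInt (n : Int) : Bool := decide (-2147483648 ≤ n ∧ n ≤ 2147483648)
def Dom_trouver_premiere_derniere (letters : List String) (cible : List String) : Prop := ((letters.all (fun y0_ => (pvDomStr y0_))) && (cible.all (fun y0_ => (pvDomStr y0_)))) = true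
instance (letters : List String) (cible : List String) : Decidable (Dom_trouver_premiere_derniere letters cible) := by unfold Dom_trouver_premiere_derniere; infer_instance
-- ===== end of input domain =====

-- B replaces A's single stateful pass (running first/last with a None guard) by two
-- independent early-terminating searches: forward for the first match, backward
-- (over the reversed list) for the last (objective: idiomatic).

-- ===== PORT A =====
def trouver_premiere_derniere (letters : List String) (cible : List String) : Option String × Option String :=
  letters.foldl
    (fun st letter =>
      if letter ∈ cible then
        (match st.1 with
         | none => some letter
         | some p => some p,
         some letter)
      else st)
    (none, none)

-- ===== PORT B =====
def trouver_premiere_derniere_alt (letters : List String) (cible : List String) : Option String × Option String :=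
  (letters.find? (fun l => decide (l ∈ cible)),
   letters.reverse.find? (fun l => decide (l ∈ cible)))

-- ===== PRECONDITION & SPEC =====
def Spec_trouver_premiere_derniere (letters : List String) (cible : List String) (out : Option String × Option String) : Prop := out = trouver_premiere_derniere_alt letters cible
instance (letters : List String) (cible : List String) (out : Option String × Option String) : Decidable (Spec_trouver_premiere_derniere letters cible out) := by unfold Spec_trouver_premiere_derniere; infer_instance

-- ===== CLAIM (what is proved, stated in full; the proofs are below) =====
def Claim_equal_trouver_premiere_derniere : Prop := ∀ (letters : List String) (cible : List String), Dom_trouver_premiere_derniere letters cible → Spec_trouver_premiere_derniere letters cible (trouver_premiere_derniere letters cible)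

-- ===== LEMMAS AND PROOFS =====

-- Loop invariant for A's fold: from state (p, d) it yields
-- (p <|> first match, last match <|> d).
theorem tpd_fold_inv (cible : List String) (letters : List String) (st : Option String × Option String) :
    letters.foldl
      (fun st letter =>
        if letter ∈ cible then
          (match st.1 with
           | none => some letter
           | some p => some p,
           some letter)
        else st)
      st
    = (st.1.or (letters.find? (fun l => decide (l ∈ cible))),
       (letters.reverse.find? (fun l => decide (l ∈ cible))).or st.2) := by
  induction letters generalizing st with
  | nil => simp
  | cons l rest ih =>
    by_cases h : l ∈ cible
    · rw [List.foldl_cons, if_pos h, ih]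
      have h1 : (match st.1 with
         | none => some l
         | some p => some p) = st.1.or (some l) := by
        cases st.1 <;> rfl
      refine Prod.ext ?_ ?_
      · simp [h1, List.find?_cons, h, Option.or_assoc]
      · simp [List.reverse_cons, List.find?_append, h, Option.or_assoc]
    · rw [List.foldl_cons, if_neg h, ih]
      simp [List.find?_cons, List.reverse_cons, List.find?_append, h]

-- ===== VERDICT (by name: the statement is the Claim_ definition above) =====
theorem trouver_premiere_derniere_spec : Claim_equal_trouver_premiere_derniere := by
  intro letters cible _
  unfold Spec_trouver_premiere_derniere trouver_premiere_derniere trouver_premiere_derniere_alt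
  rw [tpd_fold_inv]
  simp
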